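-- pv_equiv track=rewrite | github.com/Kennedh/CodeWars | Getting the Letter with Tail.py | total_possible_amount
-- ===== SOURCE A (Python) =====
-- def total_possible_amount(s):
--     n = len(s)
--     if n == 0:
--         return 0
--     dp = [0] * (n + 1)
--     dp[n] = 1
--     for i in range(n - 1, -1, -1):
--         dp[i] = dp[i + 1]
--         char = s[i]
--         target = 'X' if char == 'O' else 'O'
--         j = i + 1
--         while j < n and s[j] == target:
--             dp[i] += dp[j + 1]
--             j += 1
--     return dp[0] - 1
-- ===== SOURCE B (Python) =====
-- def total_possible_amount(s):
--     n = len(s)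
--     if n == 0:
--         return 0
--     # run lengths of equal characters, then one O(n) pass with suffix sums of dp
--     eqrun = [1] * n
--     for i in range(n - 2, -1, -1):
--         if s[i] == s[i + 1]:
--             eqrun[i] = eqrun[i + 1] + 1
--     dp = [0] * (n + 1)
--     suf = [0] * (n + 2)
--     dp[n] = 1
--     suf[n] = 1
--     for i in range(n - 1, -1, -1):
--         target = 'X' if s[i] == 'O' else 'O'
--         L = eqrun[i + 1] if i + 1 < n and s[i + 1] == target else 0
--         dp[i] = dp[i + 1] + suf[i + 2] - suf[i + 2 + L]
--         suf[i] = suf[i + 1] + dp[i]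
--     return dp[0] - 1
-- ===== Notes on version B (the rewrite author's own statement) =====
-- stated objective: alternative
-- what changed: Replaces A's per-index inner while-rescan of the following run by a precomputed equal-run-length array plus suffix sums of dp, so each dp entry is a single O(1) range difference; same return value.
import Mathlib
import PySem

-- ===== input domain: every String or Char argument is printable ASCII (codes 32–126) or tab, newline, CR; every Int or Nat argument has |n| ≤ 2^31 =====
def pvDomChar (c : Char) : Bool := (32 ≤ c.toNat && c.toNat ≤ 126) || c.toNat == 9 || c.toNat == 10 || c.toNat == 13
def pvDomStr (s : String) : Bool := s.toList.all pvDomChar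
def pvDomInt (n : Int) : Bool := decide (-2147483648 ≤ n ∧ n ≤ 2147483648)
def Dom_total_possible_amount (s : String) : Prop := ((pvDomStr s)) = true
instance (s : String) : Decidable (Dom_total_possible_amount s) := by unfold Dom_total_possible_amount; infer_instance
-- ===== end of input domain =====

-- B replaces A's inner while-rescans by precomputed equal-run lengths and suffix sums
-- of dp (each dp entry one O(1) range difference); equal return value proved for all strings.

-- ===== PORT A =====
-- inner 'while j < n and s[j] == target' loop of A
def tpaInnerA (cs : List Char) (n i : Nat) (t : Char) (j : Nat) (dp : List Int) : List Int :=
  if j < n ∧ cs.getD j ' ' == t then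
    tpaInnerA cs n i t (j + 1) (dp.set i (dp.getD i 0 + dp.getD (j + 1) 0))
  else dp
termination_by n - j
decreasing_by omega

-- outer 'for i in range(n-1,-1,-1)' loop of A; `tpaOuterA cs n i dp` runs indices i-1 … 0
def tpaOuterA (cs : List Char) (n : Nat) : Nat → List Int → List Int
  | 0, dp => dp
  | i + 1, dp =>
    let dp1 := dp.set i (dp.getD (i + 1) 0)
    let t := if cs.getD i ' ' == 'O' then 'X' else 'O'
    tpaOuterA cs n i (tpaInnerA cs n i t (i + 1) dp1)

def total_possible_amount (s : String) : Int :=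
  let cs := s.toList
  let n := cs.length
  if n = 0 then 0
  else
    let dp := (List.replicate (n + 1) (0 : Int)).set n 1
    (tpaOuterA cs n n dp).getD 0 0 - 1

-- ===== PORT B =====
-- 'for i in range(n-2,-1,-1)' building eqrun; `tpaEqB cs m e` runs indices m-1 … 0
def tpaEqB (cs : List Char) : Nat → List Int → List Int
  | 0, e => e
  | k + 1, e =>
    tpaEqB cs k
      (if cs.getD k ' ' == cs.getD (k + 1) ' ' then e.set k (e.getD (k + 1) 0 + 1) else e)

-- main 'for i in range(n-1,-1,-1)' loop of B over the pair (dp, suf)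
def tpaLoopB (cs : List Char) (n : Nat) (eq : List Int) :
    Nat → List Int × List Int → List Int × List Int
  | 0, st => st
  | i + 1, (dp, suf) =>
    let t := if cs.getD i ' ' == 'O' then 'X' else 'O'
    let L : Int := if i + 1 < n ∧ cs.getD (i + 1) ' ' == t then eq.getD (i + 1) 0 else 0
    let di := dp.getD (i + 1) 0 + suf.getD (i + 2) 0 - suf.getD (i + 2 + L.toNat) 0
    tpaLoopB cs n eq i (dp.set i di, suf.set i (suf.getD (i + 1) 0 + di))

def total_possible_amount_alt (s : String) : Int :=
  let cs := s.toList
  let n := cs.length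
  if n = 0 then 0
  else
    let eq := tpaEqB cs (n - 1) (List.replicate n (1 : Int))
    let dp := (List.replicate (n + 1) (0 : Int)).set n 1
    let suf := (List.replicate (n + 2) (0 : Int)).set n 1
    ((tpaLoopB cs n eq n (dp, suf)).1).getD 0 0 - 1

-- ===== PRECONDITION & SPEC =====
def Spec_total_possible_amount (s : String) (out : Int) : Prop := out = total_possible_amount_alt s
instance (s : String) (out : Int) : Decidable (Spec_total_possible_amount s out) := by unfold Spec_total_possible_amount; infer_instance

-- ===== CLAIM (what is proved, stated in full; the proofs are below) =====
def Claim_equal_total_possible_amount : Prop := ∀ (s : String), Dom_total_possible_amount s → Spec_total_possible_amount s (total_possible_amount s)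

-- ===== LEMMAS AND PROOFS =====

-- length of the maximal run of character t starting at index j
def tpaRun (cs : List Char) (n : Nat) (t : Char) (j : Nat) : Nat :=
  if j < n ∧ cs.getD j ' ' == t then tpaRun cs n t (j + 1) + 1 else 0
termination_by n - j
decreasing_by omega

-- the sum A's inner loop adds to dp[i]
def tpaSrun (cs : List Char) (n : Nat) (t : Char) (dp : List Int) (j : Nat) : Int :=
  if j < n ∧ cs.getD j ' ' == t then dp.getD (j + 1) 0 + tpaSrun cs n t dp (j + 1) else 0
termination_by n - j
decreasing_by omega

theorem tpa_getD_set_self (l : List Int) (i : Nat) (x : Int) (h : i < l.length) :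
    (l.set i x).getD i 0 = x := by
  simp [List.getD_eq_getElem?_getD, List.getElem?_set_self h]

theorem tpa_getD_set_ne (l : List Int) (i k : Nat) (x : Int) (h : i ≠ k) :
    (l.set i x).getD k 0 = l.getD k 0 := by
  simp [List.getD_eq_getElem?_getD, List.getElem?_set_ne h]

theorem tpa_drop_set_of_lt (l : List Int) (i j : Nat) (a : Int) (h : i < j) :
    (l.set i a).drop j = l.drop j := by
  apply List.ext_getElem?
  intro k
  simp [List.getElem?_drop, List.getElem?_set_ne (show i ≠ j + k by omega)]

theorem tpa_drop_cons (l : List Int) (j : Nat) (h : j < l.length) :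
    (l.drop j).sum = l.getD j 0 + (l.drop (j + 1)).sum := by
  rw [List.getD_eq_getElem?_getD, List.getElem?_eq_getElem h, Option.getD_some,
    List.drop_eq_getElem_cons h, List.sum_cons]

theorem tpaRun_le (cs : List Char) (n : Nat) (t : Char) (j : Nat) (h : j ≤ n) :
    j + tpaRun cs n t j ≤ n := by
  rw [tpaRun]
  split_ifs with hc
  · have ih := tpaRun_le cs n t (j + 1) (by omega)
    omega
  · omega
termination_by n - j
decreasing_by omega

theorem tpaSrun_set (cs : List Char) (n : Nat) (t : Char) (dp : List Int) (i j : Nat)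
    (x : Int) (h : i < j) : tpaSrun cs n t (dp.set i x) j = tpaSrun cs n t dp j := by
  have hl : tpaSrun cs n t (dp.set i x) j = if j < n ∧ cs.getD j ' ' == t then
      (dp.set i x).getD (j + 1) 0 + tpaSrun cs n t (dp.set i x) (j + 1) else 0 := by
    rw [tpaSrun]
  have hr : tpaSrun cs n t dp j = if j < n ∧ cs.getD j ' ' == t then
      dp.getD (j + 1) 0 + tpaSrun cs n t dp (j + 1) else 0 := by
    rw [tpaSrun]
  rw [hl, hr]
  split_ifs with hc
  · rw [tpaSrun_set cs n t dp i (j + 1) x (by omega),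
      tpa_getD_set_ne dp i (j + 1) x (by omega)]
  · rfl
termination_by n - j
decreasing_by omega

theorem tpaInnerA_eq (cs : List Char) (n i : Nat) (t : Char) (j : Nat) (dp : List Int)
    (hij : i < j) (hilen : i < dp.length) :
    tpaInnerA cs n i t j dp = dp.set i (dp.getD i 0 + tpaSrun cs n t dp j) := by
  rw [tpaInnerA]
  split_ifs with hc
  · rw [tpaInnerA_eq cs n i t (j + 1) _ (by omega) (by simpa using hilen)]
    rw [List.set_set, tpaSrun_set cs n t dp i (j + 1) _ (by omega),
      tpa_getD_set_self dp i _ hilen]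
    have hs : tpaSrun cs n t dp j = dp.getD (j + 1) 0 + tpaSrun cs n t dp (j + 1) := by
      rw [tpaSrun, if_pos hc]
    rw [hs]
    congr 1
    ring
  · rw [tpaSrun, if_neg hc, add_zero]
    have hset : dp.set i (dp.getD i 0) = dp := by
      apply List.ext_getElem?
      intro k
      by_cases hik : i = k
      · subst hik
        rw [List.getElem?_set_self hilen, List.getD_eq_getElem?_getD,
          List.getElem?_eq_getElem hilen, Option.getD_some]
      · rw [List.getElem?_set_ne hik]
    rw [hset]
termination_by n - j
decreasing_by omega

theorem tpaSrun_eq_drop (cs : List Char) (n : Nat) (t : Char) (dp : List Int) (j : Nat)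
    (_hj : j ≤ n) (hlen : dp.length = n + 1) :
    tpaSrun cs n t dp j = (dp.drop (j + 1)).sum - (dp.drop (j + 1 + tpaRun cs n t j)).sum := by
  rw [tpaSrun, tpaRun]
  split_ifs with hc
  · rw [tpaSrun_eq_drop cs n t dp (j + 1) (by omega) hlen]
    rw [tpa_drop_cons dp (j + 1) (by omega)]
    have he : j + 1 + (tpaRun cs n t (j + 1) + 1) = j + 1 + 1 + tpaRun cs n t (j + 1) := by omega
    rw [he]
    ring
  · simp
termination_by n - j
decreasing_by omega

theorem tpaEqB_spec (cs : List Char) (n : Nat) (hn : cs.length = n) (m : Nat) (e : List Int)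
    (hm : m ≤ n - 1) (hlen : e.length = n)
    (hlow : ∀ k, k < m → k < n → e.getD k 0 = 1)
    (hhigh : ∀ k, m ≤ k → k < n → e.getD k 0 = (tpaRun cs n (cs.getD k ' ') k : Int)) :
    ∀ k, k < n → (tpaEqB cs m e).getD k 0 = (tpaRun cs n (cs.getD k ' ') k : Int) := by
  induction m generalizing e with
  | zero =>
    intro k hk
    simpa [tpaEqB] using hhigh k (Nat.zero_le k) hk
  | succ m ih =>
    intro k hk
    have hmn : m + 1 < n := by omega
    rw [tpaEqB]
    have hlen' : (if cs.getD m ' ' == cs.getD (m + 1) ' '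
        then e.set m (e.getD (m + 1) 0 + 1) else e).length = n := by
      split_ifs <;> simp [hlen]
    have hlow' : ∀ k', k' < m → k' < n →
        (if cs.getD m ' ' == cs.getD (m + 1) ' '
          then e.set m (e.getD (m + 1) 0 + 1) else e).getD k' 0 = 1 := by
      intro k' hk' hk'n
      split_ifs with hc
      · rw [tpa_getD_set_ne e m k' _ (by omega)]
        exact hlow k' (by omega) hk'n
      · exact hlow k' (by omega) hk'n
    have hhigh' : ∀ k', m ≤ k' → k' < n →
        (if cs.getD m ' ' == cs.getD (m + 1) ' '
          then e.set m (e.getD (m + 1) 0 + 1) else e).getD k' 0 =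
          (tpaRun cs n (cs.getD k' ' ') k' : Int) := by
      intro k' hk' hk'n
      rcases Nat.eq_or_lt_of_le hk' with rfl | hgt
      · split_ifs with hc
        · rw [tpa_getD_set_self e m _ (by omega)]
          have hceq : cs.getD m ' ' = cs.getD (m + 1) ' ' := beq_iff_eq.mp hc
          have h1 : tpaRun cs n (cs.getD m ' ') m =
              tpaRun cs n (cs.getD m ' ') (m + 1) + 1 := by
            rw [tpaRun, if_pos ⟨hk'n, beq_self_eq_true _⟩]
          have h2 : tpaRun cs n (cs.getD m ' ') (m + 1) =
              tpaRun cs n (cs.getD (m + 1) ' ') (m + 1) := by rw [hceq]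
          rw [h1, h2]
          push_cast
          rw [← hhigh (m + 1) (by omega) (by omega)]
        · have h2 : ¬(m + 1 < n ∧ (cs.getD (m + 1) ' ' == cs.getD m ' ') = true) := by
            rintro ⟨-, hb⟩
            exact hc (by rw [beq_iff_eq] at hb ⊢; exact hb.symm)
          have h1 : tpaRun cs n (cs.getD m ' ') m = 1 := by
            rw [tpaRun, if_pos ⟨hk'n, beq_self_eq_true _⟩, tpaRun, if_neg h2]
          rw [h1]
          exact_mod_cast hlow m (by omega) hk'n
      · split_ifs with hc
        · rw [tpa_getD_set_ne e m k' _ (by omega)]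
          exact hhigh k' (by omega) hk'n
        · exact hhigh k' (by omega) hk'n
    exact ih _ (by omega) hlen' hlow' hhigh' k hk

theorem tpaLoopB_eq (cs : List Char) (n : Nat) (E : List Int)
    (hE : ∀ k, k < n → E.getD k 0 = (tpaRun cs n (cs.getD k ' ') k : Int)) :
    ∀ (i : Nat), i ≤ n → ∀ (dp suf : List Int), dp.length = n + 1 → suf.length = n + 2 →
      (∀ k, i ≤ k → suf.getD k 0 = (dp.drop k).sum) →
      (tpaLoopB cs n E i (dp, suf)).1 = tpaOuterA cs n i dp := by
  intro i
  induction i with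
  | zero =>
    intro _ dp suf _ _ _
    rw [tpaLoopB, tpaOuterA]
  | succ i ih =>
    intro hin dp suf hdl hsl hinv
    rw [tpaLoopB, tpaOuterA]
    set t := if cs.getD i ' ' == 'O' then 'X' else 'O' with ht
    set R := tpaRun cs n t (i + 1) with hR
    have hRle : i + 1 + R ≤ n := tpaRun_le cs n t (i + 1) (by omega)
    have hL : (if i + 1 < n ∧ cs.getD (i + 1) ' ' == t then E.getD (i + 1) 0 else 0) = (R : Int) := by
      split_ifs with hc
      · rw [hE (i + 1) hc.1, hR]
        congr 1
        congr 1
        exact beq_iff_eq.mp hc.2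
      · rw [hR, tpaRun, if_neg hc]
        rfl
    -- A's inner loop in closed form
    have hA : tpaInnerA cs n i t (i + 1) (dp.set i (dp.getD (i + 1) 0)) =
        dp.set i (dp.getD (i + 1) 0 + tpaSrun cs n t dp (i + 1)) := by
      rw [tpaInnerA_eq cs n i t (i + 1) _ (by omega) (by simp [hdl]; omega)]
      rw [List.set_set, tpaSrun_set cs n t dp i (i + 1) _ (by omega),
        tpa_getD_set_self dp i _ (by omega)]
    -- B's dp entry equals A's
    have hdi : dp.getD (i + 1) 0 + suf.getD (i + 2) 0 -
        suf.getD (i + 2 + ((if i + 1 < n ∧ cs.getD (i + 1) ' ' == t then E.getD (i + 1) 0 else 0)).toNat) 0 =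
        dp.getD (i + 1) 0 + tpaSrun cs n t dp (i + 1) := by
      rw [hL]
      rw [tpaSrun_eq_drop cs n t dp (i + 1) (by omega) hdl]
      rw [hinv (i + 2) (by omega), hinv (i + 2 + (R : Int).toNat) (by omega)]
      have : (R : Int).toNat = R := Int.toNat_natCast R
      rw [this]
      have : i + 2 + R = i + 1 + 1 + R := by omega
      rw [this]
      ring
    rw [hA]
    simp only [ht] at hdi ⊢
    rw [hdi]
    apply ih (by omega) _ _ (by simp [hdl]) (by simp [hsl])
    -- the suffix-sum invariant is preserved
    intro k hk
    set di := dp.getD (i + 1) 0 + tpaSrun cs n t dp (i + 1) with hdid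
    rcases Nat.eq_or_lt_of_le hk with rfl | hgt
    · rw [tpa_getD_set_self suf i _ (by omega)]
      rw [hinv (i + 1) (by omega)]
      rw [tpa_drop_cons (dp.set i di) i (by simp [hdl]; omega)]
      rw [tpa_getD_set_self dp i _ (by omega)]
      rw [tpa_drop_set_of_lt dp i (i + 1) _ (by omega)]
      ring
    · rw [tpa_getD_set_ne suf i k _ (by omega)]
      rw [tpa_drop_set_of_lt dp i k _ (by omega)]
      exact hinv k (by omega)

theorem tpa_main (cs : List Char) (n : Nat) (hn : cs.length = n) (h1 : 1 ≤ n) :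
    (tpaLoopB cs n (tpaEqB cs (n - 1) (List.replicate n (1 : Int))) n
      ((List.replicate (n + 1) (0 : Int)).set n 1,
        (List.replicate (n + 2) (0 : Int)).set n 1)).1 =
    tpaOuterA cs n n ((List.replicate (n + 1) (0 : Int)).set n 1) := by
  have hE : ∀ k, k < n → (tpaEqB cs (n - 1) (List.replicate n (1 : Int))).getD k 0 =
      (tpaRun cs n (cs.getD k ' ') k : Int) := by
    apply tpaEqB_spec cs n hn (n - 1) _ (le_refl _) (by simp)
    · intro k hk hkn
      simp [List.getD_eq_getElem?_getD, hkn]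
    · intro k hk hkn
      have h2 : ¬(k + 1 < n ∧ (cs.getD (k + 1) ' ' == cs.getD k ' ') = true) := by
        rintro ⟨hlt, -⟩
        omega
      have hr1 : tpaRun cs n (cs.getD k ' ') k = 1 := by
        rw [tpaRun, if_pos ⟨hkn, beq_self_eq_true _⟩, tpaRun, if_neg h2]
      rw [hr1]
      simp [List.getD_eq_getElem?_getD, hkn]
  apply tpaLoopB_eq cs n _ hE n (le_refl n) _ _ (by simp) (by simp)
  intro k hk
  set dp0 := (List.replicate (n + 1) (0 : Int)).set n 1 with hdp0
  have hdl : dp0.length = n + 1 := by simp [hdp0]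
  rcases Nat.eq_or_lt_of_le hk with rfl | hgt
  · rw [tpa_getD_set_self (List.replicate (n + 2) 0) n _ (by simp)]
    rw [tpa_drop_cons dp0 n (by omega)]
    rw [tpa_getD_set_self (List.replicate (n + 1) 0) n _ (by simp)]
    have hnil : dp0.drop (n + 1) = [] := List.drop_eq_nil_of_le (by omega)
    rw [hnil]
    simp
  · have h1' : ((List.replicate (n + 2) (0 : Int)).set n 1).getD k 0 = 0 := by
      rw [tpa_getD_set_ne _ n k _ (by omega)]
      simp [List.getD_eq_getElem?_getD]
    rw [h1']
    have hnil : dp0.drop k = [] := List.drop_eq_nil_of_le (by omega)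
    rw [hnil]
    rfl

-- ===== VERDICT (by name: the statement is the Claim_ definition above) =====
theorem total_possible_amount_spec : Claim_equal_total_possible_amount := by
  intro s _
  unfold Spec_total_possible_amount total_possible_amount total_possible_amount_alt
  dsimp only
  split_ifs with h
  · rfl
  · have h1 : 1 ≤ s.toList.length := by
      rcases Nat.eq_zero_or_pos s.toList.length with h0 | h0
      · exfalso
        apply h
        exact h0
      · omega
    rw [tpa_main s.toList s.toList.length rfl h1]
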